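-- pv_equiv track=rewrite | github.com/anhnx000/analyze_yourmechanic | scraper_advanced.py | _group_services_by_keywords
-- ===== SOURCE A (Python) =====
-- from typing import Dict, List, Optional
--
-- def _group_services_by_keywords(services: List[str]) -> Dict[str, List[str]]:
--     """Nhóm các dịch vụ theo từ khóa chính"""
--     groups = {
--         "Battery": [],
--         "Brakes": [],
--         "Engine": [],
--         "Transmission": [],
--         "Suspension": [],
--         "Diagnostics": [],
--         "Electrical": [],
--         "Heating & AC": [],
--         "Filters": [],
--         "Fluids": [],
--         "Others": []
--     }
--
--     keywords_map = {
--         "Battery": ["battery", "alternator", "starter"],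
--         "Brakes": ["brake", "pad", "rotor", "caliper"],
--         "Engine": ["engine", "oil", "spark", "timing", "belt", "pump"],
--         "Transmission": ["transmission", "clutch", "cv", "axle"],
--         "Suspension": ["shock", "strut", "suspension", "steering"],
--         "Diagnostics": ["inspection", "diagnostic", "check", "light"],
--         "Electrical": ["light", "sensor", "switch", "electrical"],
--         "Heating & AC": ["ac", "heating", "heater", "condenser", "compressor"],
--         "Filters": ["filter"],
--         "Fluids": ["fluid", "flush", "service"]
--     }
--
--     for service in services:
--         service_lower = service.lower()
--         categorized = False
--
--         for category, keywords in keywords_map.items():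
--             if any(keyword in service_lower for keyword in keywords):
--                 # Avoid duplicates in same category
--                 if service not in groups[category]:
--                     groups[category].append(service)
--                 categorized = True
--                 break
--
--         if not categorized and service not in groups["Others"]:
--             groups["Others"].append(service)
--
--     # Loại bỏ categories rỗng và remove duplicates
--     result = {}
--     for k, v in groups.items():
--         if v:
--             # Remove duplicates while preserving order
--             unique_services = list(dict.fromkeys(v))
--             result[k] = unique_services
--
--     return result
-- ===== SOURCE B (Python) =====
-- from typing import Dict, List
--
-- _KEYWORDS = [
--     ("Battery", ["battery", "alternator", "starter"]),
--     ("Brakes", ["brake", "pad", "rotor", "caliper"]),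
--     ("Engine", ["engine", "oil", "spark", "timing", "belt", "pump"]),
--     ("Transmission", ["transmission", "clutch", "cv", "axle"]),
--     ("Suspension", ["shock", "strut", "suspension", "steering"]),
--     ("Diagnostics", ["inspection", "diagnostic", "check", "light"]),
--     ("Electrical", ["light", "sensor", "switch", "electrical"]),
--     ("Heating & AC", ["ac", "heating", "heater", "condenser", "compressor"]),
--     ("Filters", ["filter"]),
--     ("Fluids", ["fluid", "flush", "service"]),
-- ]
--
-- def _group_services_by_keywords(services: List[str]) -> Dict[str, List[str]]:
--     # Category-major pass: each category collects, in original order, the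
--     # services matching one of its keywords that no earlier category claimed.
--     assigned = set()
--     result = {}
--     for category, keywords in _KEYWORDS:
--         bucket = []
--         for s in services:
--             if s not in assigned and any(kw in s.lower() for kw in keywords):
--                 bucket.append(s)
--                 assigned.add(s)
--         if bucket:
--             result[category] = bucket
--     others = []
--     for s in services:
--         if s not in assigned and s not in others:
--             others.append(s)
--     if others:
--         result["Others"] = others
--     return result
-- ===== Notes on version B (the rewrite author's own statement) =====
-- stated objective: alternative
-- what changed: Inverted the loop nesting from service-major (each service searches categories with break, plus a final dedup/filter rebuild) to category-major: each category scans the services once claiming unassigned matches via an `assigned` set, with still-unassigned services collected as Others, so no per-service category search, no membership test against the growing bucket and no final dict.fromkeys pass.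
import Mathlib
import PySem

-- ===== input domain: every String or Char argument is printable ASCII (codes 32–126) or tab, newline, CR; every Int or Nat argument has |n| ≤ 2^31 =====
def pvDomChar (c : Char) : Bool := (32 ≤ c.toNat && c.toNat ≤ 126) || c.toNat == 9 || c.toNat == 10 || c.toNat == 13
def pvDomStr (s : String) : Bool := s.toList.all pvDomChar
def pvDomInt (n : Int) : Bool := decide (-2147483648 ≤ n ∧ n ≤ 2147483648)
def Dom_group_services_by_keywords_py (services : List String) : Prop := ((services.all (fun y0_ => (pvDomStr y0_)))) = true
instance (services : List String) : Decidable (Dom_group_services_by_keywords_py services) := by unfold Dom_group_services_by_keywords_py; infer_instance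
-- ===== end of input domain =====

-- B replaces A's service-major search (per-service scan of the categories with break, then a
-- rebuild pass with dict.fromkeys) by a category-major pass over the services guarded by an
-- `assigned` set; objective: alternative decomposition (not measured faster).

-- The fixed keyword table (shared constant of both implementations).
def pvKeywords : List (String × List String) :=
  [("Battery", ["battery", "alternator", "starter"]),
   ("Brakes", ["brake", "pad", "rotor", "caliper"]),
   ("Engine", ["engine", "oil", "spark", "timing", "belt", "pump"]),
   ("Transmission", ["transmission", "clutch", "cv", "axle"]),
   ("Suspension", ["shock", "strut", "suspension", "steering"]),
   ("Diagnostics", ["inspection", "diagnostic", "check", "light"]),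
   ("Electrical", ["light", "sensor", "switch", "electrical"]),
   ("Heating & AC", ["ac", "heating", "heater", "condenser", "compressor"]),
   ("Filters", ["filter"]),
   ("Fluids", ["fluid", "flush", "service"])]

-- ===== PORT A =====
def group_services_by_keywords_py (services : List String) : List (String × List String) :=
  let groups0 : PySem.Dict String (List String) := PySem.Dict.mk
    [("Battery", []), ("Brakes", []), ("Engine", []), ("Transmission", []), ("Suspension", []),
     ("Diagnostics", []), ("Electrical", []), ("Heating & AC", []), ("Filters", []),
     ("Fluids", []), ("Others", [])]
  let groups := services.foldl (fun groups service =>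
    let sl := PySem.Str.lower service
    -- inner 'for category, keywords … break' = first match in the table
    match pvKeywords.find? (fun p => p.2.any (fun kw => PySem.Str.isIn kw sl)) with
    | some p =>
      let cur := groups.getD p.1 []
      if cur.contains service then groups else groups.insert p.1 (cur ++ [service])
    | none =>
      let cur := groups.getD "Others" []
      if cur.contains service then groups else groups.insert "Others" (cur ++ [service])) groups0
  (groups.items.foldl (fun (result : PySem.Dict String (List String)) kv =>
      if kv.2 ≠ [] then result.insert kv.1 (PySem.List.dedup kv.2) else result)
    PySem.Dict.empty).items

-- ===== PORT B =====
def group_services_by_keywords_py_alt (services : List String) : List (String × List String) :=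
  let step := pvKeywords.foldl
    (fun (acc : PySem.Dict String (List String) × PySem.Set String) ck =>
      let inner := services.foldl (fun (bs : List String × PySem.Set String) s =>
        if !(PySem.Set.contains bs.2 s) && ck.2.any (fun kw => PySem.Str.isIn kw (PySem.Str.lower s)) then
          (bs.1 ++ [s], PySem.Set.add bs.2 s)
        else bs) (([] : List String), acc.2)
      (if inner.1 ≠ [] then acc.1.insert ck.1 inner.1 else acc.1, inner.2))
    (PySem.Dict.empty, PySem.Set.empty)
  let others := services.foldl (fun (o : List String) s =>
    if !(PySem.Set.contains step.2 s) && !(o.contains s) then o ++ [s] else o) []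
  (if others ≠ [] then step.1.insert "Others" others else step.1).items

-- ===== PRECONDITION & SPEC =====
def Spec_group_services_by_keywords_py (services : List String) (out : List (String × List String)) : Prop := out = group_services_by_keywords_py_alt services
instance (services : List String) (out : List (String × List String)) : Decidable (Spec_group_services_by_keywords_py services out) := by unfold Spec_group_services_by_keywords_py; infer_instance

-- ===== CLAIM (what is proved, stated in full; the proofs are below) =====
def Claim_equal_group_services_by_keywords_py : Prop := ∀ (services : List String), Dom_group_services_by_keywords_py services → Spec_group_services_by_keywords_py services (group_services_by_keywords_py services)

-- ===== LEMMAS AND PROOFS =====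

-- The common canonical form: the category a single service lands in, and the bucket of a category.
def pvMat (kws : List String) (s : String) : Bool :=
  kws.any (fun kw => PySem.Str.isIn kw (PySem.Str.lower s))

def pvCat (s : String) : String :=
  match pvKeywords.find? (fun p => pvMat p.2 s) with
  | some p => p.1
  | none => "Others"

def pvBucket (c : String) (svs : List String) : List String :=
  PySem.List.dedup (svs.filter (fun s => pvCat s == c))

def pvCats : List String := pvKeywords.map (·.1) ++ ["Others"]

def pvTarget (svs : List String) : List (String × List String) :=
  (pvCats.map (fun c => (c, pvBucket c svs))).filter (fun kv => kv.2 ≠ [])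


-- ---- generic dedup facts (on top of PySem.Set) ----

theorem pv_dedup_append (l : List String) (s : String) :
    PySem.List.dedup (l ++ [s]) =
      if s ∈ l then PySem.List.dedup l else PySem.List.dedup l ++ [s] := by
  simp only [PySem.List.dedup_eq_ofList, PySem.Set.ofList_append_singleton,
    PySem.Set.add_eq_ite, PySem.Set.mem_ofList]

theorem pv_dedup_absorb (b t : List String) (s : String) (h : s ∈ b) :
    PySem.List.dedup (b ++ s :: t) = PySem.List.dedup (b ++ t) := by
  have h1 : b ++ s :: t = (b ++ [s]) ++ t := by simp
  have h2 : PySem.Set.ofList (b ++ [s]) = PySem.Set.ofList b := by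
    rw [PySem.Set.ofList_append_singleton,
      PySem.Set.add_of_mem (by simpa [PySem.Set.mem_ofList] using h)]
  rw [h1, PySem.List.dedup_eq_ofList, PySem.List.dedup_eq_ofList,
    PySem.Set.ofList_append, h2, ← PySem.Set.ofList_append]

theorem pv_dedup_dedup (l : List String) :
    PySem.List.dedup (PySem.List.dedup l) = PySem.List.dedup l := by
  simp only [PySem.List.dedup_eq_ofList]
  exact PySem.Set.ofList_eq_self_of_nodup _ (PySem.Set.nodup_ofList l)

-- ---- facts about the fixed table ----

theorem pv_names_nodup : (pvKeywords.map (·.1)).Nodup := by decide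

theorem pv_others_not_name : "Others" ∉ pvKeywords.map (·.1) := by decide

theorem pv_cats_nodup : pvCats.Nodup := by decide

theorem pv_cat_mem (s : String) : pvCat s ∈ pvCats := by
  unfold pvCat
  cases h : pvKeywords.find? (fun p => pvMat p.2 s) with
  | none => simp [pvCats]
  | some p =>
    have hp := List.mem_of_find?_eq_some h
    simp only [pvCats, List.mem_append, List.mem_map]
    exact Or.inl ⟨p, hp, rfl⟩

-- ---- Dict.mk over a map of categories ----

theorem pv_get?_mk_map (f : String → List String) :
    ∀ (cs : List String), ∀ c ∈ cs,
      (PySem.Dict.mk (cs.map (fun c' => (c', f c')))).get? c = some (f c) := by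
  intro cs
  induction cs with
  | nil => intro c hc; cases hc
  | cons c' cs ih =>
    intro c hc
    simp only [List.map_cons, PySem.Dict.get?_mk_cons]
    by_cases h : c' = c
    · simp [h]
    · have hc' : c ∈ cs := by
        cases hc with
        | head => exact absurd rfl h
        | tail _ h2 => exact h2
      simp [h, ih c hc']

theorem pv_getD_mk_map (f : String → List String) (cs : List String) (c : String) (hc : c ∈ cs) :
    (PySem.Dict.mk (cs.map (fun c' => (c', f c')))).getD c [] = f c := by
  rw [PySem.Dict.getD_eq_get?_getD, pv_get?_mk_map f cs c hc]; rfl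

theorem pv_insert_mk_map (f : String → List String) (cs : List String) (c0 : String)
    (hc : c0 ∈ cs) (v : List String) :
    (PySem.Dict.mk (cs.map (fun c' => (c', f c')))).insert c0 v
      = PySem.Dict.mk (cs.map (fun c' => (c', if c' = c0 then v else f c'))) := by
  have hcont : (PySem.Dict.mk (cs.map (fun c' => (c', f c')))).contains c0 = true := by
    rw [PySem.Dict.contains_eq_decide_mem_keys]
    simp only [PySem.Dict.keys, List.map_map]
    simpa using hc
  apply PySem.Dict.ext
  rw [PySem.Dict.items_insert_of_contains _ _ hcont]
  show List.map _ (cs.map (fun c' => (c', f c'))) = _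
  rw [List.map_map]
  apply List.map_congr_left
  intro c _
  by_cases h : c = c0 <;> simp [h]

-- ---- A: the service loop builds the canonical dict ----

theorem pv_A_step_core (pre : List String) (s c0 : String) (hc : c0 ∈ pvCats)
    (hcat : pvCat s = c0) :
    (if ((PySem.Dict.mk (pvCats.map (fun c => (c, pvBucket c pre)))).getD c0 []).contains s then
        PySem.Dict.mk (pvCats.map (fun c => (c, pvBucket c pre)))
      else (PySem.Dict.mk (pvCats.map (fun c => (c, pvBucket c pre)))).insert c0
        ((PySem.Dict.mk (pvCats.map (fun c => (c, pvBucket c pre)))).getD c0 [] ++ [s]))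
      = PySem.Dict.mk (pvCats.map (fun c => (c, pvBucket c (pre ++ [s])))) := by
  rw [pv_getD_mk_map _ _ _ hc]
  have hmem : (pvBucket c0 pre).contains s = true ↔ s ∈ pre := by
    simp only [List.contains_iff_mem, pvBucket, PySem.List.dedup_eq_ofList,
      PySem.Set.mem_ofList, List.mem_filter, beq_iff_eq, hcat]
    simp
  have hbucket : ∀ c, pvBucket c (pre ++ [s]) =
      if pvCat s = c ∧ s ∉ pre then pvBucket c pre ++ [s] else pvBucket c pre := by
    intro c
    unfold pvBucket
    rw [List.filter_append]
    by_cases h1 : pvCat s = c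
    · simp only [List.filter, h1, beq_self_eq_true]
      rw [pv_dedup_append]
      by_cases h2 : s ∈ pre
      · simp [h1, h2, List.mem_filter]
      · have h3 : s ∉ pre.filter (fun t => pvCat t == c) := by
          intro hmemf; exact h2 (List.mem_of_mem_filter hmemf)
        simp [h2, h3]
    · have h4 : (List.filter (fun t => pvCat t == c) [s]) = [] := by
        simp [h1]
      rw [h4]
      simp [h1]
  by_cases hs : s ∈ pre
  · rw [if_pos (hmem.mpr hs)]
    apply PySem.Dict.ext
    show List.map _ _ = List.map _ _
    apply List.map_congr_left
    intro c _
    rw [hbucket c]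
    simp [hs]
  · rw [if_neg (by rw [hmem]; exact hs)]
    rw [pv_insert_mk_map _ _ _ hc]
    apply PySem.Dict.ext
    show List.map _ _ = List.map _ _
    apply List.map_congr_left
    intro c _
    rw [hbucket c]
    by_cases h : c = c0
    · simp [h, hcat, hs]
    · have hne : ¬ (pvCat s = c ∧ s ∉ pre) := by
        intro hcc; exact h (hcc.1 ▸ hcat ▸ rfl)
      simp [h, hne]

theorem pv_A_loop (svs : List String) :
    svs.foldl (fun groups service =>
      let sl := PySem.Str.lower service
      match pvKeywords.find? (fun p => p.2.any (fun kw => PySem.Str.isIn kw sl)) with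
      | some p =>
        let cur := groups.getD p.1 []
        if cur.contains service then groups else groups.insert p.1 (cur ++ [service])
      | none =>
        let cur := groups.getD "Others" []
        if cur.contains service then groups else groups.insert "Others" (cur ++ [service]))
      (PySem.Dict.mk
        [("Battery", []), ("Brakes", []), ("Engine", []), ("Transmission", []), ("Suspension", []),
         ("Diagnostics", []), ("Electrical", []), ("Heating & AC", []), ("Filters", []),
         ("Fluids", []), ("Others", [])])
    = PySem.Dict.mk (pvCats.map (fun c => (c, pvBucket c svs))) := by
  induction svs using List.reverseRecOn with
  | nil => rfl
  | append_singleton pre s ih =>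
    rw [List.foldl_append, ih]
    show (match pvKeywords.find? (fun p => p.2.any (fun kw => PySem.Str.isIn kw (PySem.Str.lower s))) with
      | some p => _
      | none => _) = _
    cases h : pvKeywords.find? (fun p => p.2.any (fun kw => PySem.Str.isIn kw (PySem.Str.lower s))) with
    | some p =>
      have hcat : pvCat s = p.1 := by
        unfold pvCat
        have h2 : pvKeywords.find? (fun p => pvMat p.2 s) = some p := h
        rw [h2]
      have hc : p.1 ∈ pvCats := hcat ▸ pv_cat_mem s
      exact pv_A_step_core pre s p.1 hc hcat
    | none =>
      have hcat : pvCat s = "Others" := by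
        unfold pvCat
        have h2 : pvKeywords.find? (fun p => pvMat p.2 s) = none := h
        rw [h2]
      have hc : ("Others" : String) ∈ pvCats := by decide
      exact pv_A_step_core pre s "Others" hc hcat

-- ---- A: the rebuild pass over items ----

theorem pv_foldl_result :
    ∀ (l : List (String × List String)) (d : PySem.Dict String (List String)),
      (l.map (·.1)).Nodup → (∀ kv ∈ l, d.contains kv.1 = false) →
      (l.foldl (fun result kv =>
          if kv.2 ≠ [] then result.insert kv.1 (PySem.List.dedup kv.2) else result) d).items
        = d.items ++ (l.filter (fun kv => kv.2 ≠ [])).map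
            (fun kv => (kv.1, PySem.List.dedup kv.2)) := by
  intro l
  induction l with
  | nil => intro d _ _; simp
  | cons kv l ih =>
    intro d hnd hfresh
    rw [List.map_cons, List.nodup_cons] at hnd
    obtain ⟨hkn, hnd'⟩ := hnd
    simp only [List.foldl_cons]
    by_cases h : kv.2 ≠ []
    · rw [if_pos h]
      have hkv : d.contains kv.1 = false := hfresh kv List.mem_cons_self
      have h2 := ih (d.insert kv.1 (PySem.List.dedup kv.2)) hnd'
        (by
          intro kv' hkv'
          rw [PySem.Dict.contains_insert]
          have hne : (kv'.1 == kv.1) = false := by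
            rw [beq_eq_false_iff_ne]
            intro heq
            exact hkn (heq ▸ List.mem_map_of_mem hkv')
          rw [hne, hfresh kv' (List.mem_cons_of_mem _ hkv')]
          rfl)
      rw [h2, PySem.Dict.items_insert_of_not_contains _ _ hkv]
      simp [h]
    · rw [if_neg h]
      rw [ih d hnd' (fun kv' hkv' => hfresh kv' (List.mem_cons_of_mem _ hkv'))]
      simp [h]

theorem pv_A_eq_target (svs : List String) :
    group_services_by_keywords_py svs = pvTarget svs := by
  show ((List.foldl (fun groups service =>
      let sl := PySem.Str.lower service
      match pvKeywords.find? (fun p => p.2.any (fun kw => PySem.Str.isIn kw sl)) with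
      | some p =>
        let cur := groups.getD p.1 []
        if cur.contains service then groups else groups.insert p.1 (cur ++ [service])
      | none =>
        let cur := groups.getD "Others" []
        if cur.contains service then groups else groups.insert "Others" (cur ++ [service]))
      (PySem.Dict.mk
        [("Battery", []), ("Brakes", []), ("Engine", []), ("Transmission", []), ("Suspension", []),
         ("Diagnostics", []), ("Electrical", []), ("Heating & AC", []), ("Filters", []),
         ("Fluids", []), ("Others", [])]) svs).items.foldl (fun result kv =>
        if kv.2 ≠ [] then result.insert kv.1 (PySem.List.dedup kv.2) else result)
      PySem.Dict.empty).items = pvTarget svs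
  rw [pv_A_loop svs]
  have hitems : (PySem.Dict.mk (pvCats.map (fun c => (c, pvBucket c svs)))).items
      = pvCats.map (fun c => (c, pvBucket c svs)) := rfl
  rw [hitems]
  have hnd : ((pvCats.map (fun c => (c, pvBucket c svs))).map (·.1)).Nodup := by
    have h1 : (pvCats.map (fun c => (c, pvBucket c svs))).map (·.1) = pvCats := by
      rw [List.map_map]; rfl
    rw [h1]; exact pv_cats_nodup
  rw [pv_foldl_result _ _ hnd (by intro kv _; rfl)]
  have hemp : (PySem.Dict.empty : PySem.Dict String (List String)).items = [] := rfl
  rw [hemp, List.nil_append]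
  unfold pvTarget
  have hcong : ∀ kv ∈ (pvCats.map (fun c => (c, pvBucket c svs))).filter (fun kv => kv.2 ≠ []),
      (fun kv => (kv.1, PySem.List.dedup kv.2)) kv = id kv := by
    intro kv hkv
    obtain ⟨c, _, rfl⟩ := List.mem_map.mp (List.mem_of_mem_filter hkv)
    simp only [pvBucket, pv_dedup_dedup, id]
  rw [List.map_congr_left hcong, List.map_id]

-- ---- B: the guarded category-major scans ----

theorem pv_mat_eq (kws : List String) (s : String) :
    kws.any (fun kw => PySem.Str.isIn kw (PySem.Str.lower s)) = pvMat kws s := rfl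

theorem pv_nodup_snoc (l : List String) (x : String) (h : l.Nodup) (hx : x ∉ l) :
    (l ++ [x]).Nodup := by
  rw [List.nodup_append]
  refine ⟨h, List.nodup_singleton x, ?_⟩
  intro a ha b hb
  simp only [List.mem_singleton] at hb
  subst hb
  intro heq
  exact hx (heq ▸ ha)

theorem pv_scan (kws : List String) (Q : String → Bool) :
    ∀ (l b : List String) (asg : PySem.Set String),
      b.Nodup → (∀ x, x ∈ asg ↔ (Q x = true ∨ x ∈ b)) →
      (List.foldl (fun bs s =>
          if !(PySem.Set.contains bs.2 s) && kws.any (fun kw => PySem.Str.isIn kw (PySem.Str.lower s)) then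
            (bs.1 ++ [s], PySem.Set.add bs.2 s)
          else bs) (b, asg) l).1
        = PySem.List.dedup (b ++ l.filter (fun s => !(Q s) && kws.any (fun kw => PySem.Str.isIn kw (PySem.Str.lower s))))
      ∧ ∀ x, x ∈ (List.foldl (fun bs s =>
          if !(PySem.Set.contains bs.2 s) && kws.any (fun kw => PySem.Str.isIn kw (PySem.Str.lower s)) then
            (bs.1 ++ [s], PySem.Set.add bs.2 s)
          else bs) (b, asg) l).2 ↔ (Q x = true ∨ x ∈ (List.foldl (fun bs s =>
          if !(PySem.Set.contains bs.2 s) && kws.any (fun kw => PySem.Str.isIn kw (PySem.Str.lower s)) then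
            (bs.1 ++ [s], PySem.Set.add bs.2 s)
          else bs) (b, asg) l).1) := by
  intro l
  induction l with
  | nil =>
    intro b asg hnd hasg
    constructor
    · simp [PySem.List.dedup_eq_ofList, PySem.Set.ofList_eq_self_of_nodup _ hnd]
    · simpa using hasg
  | cons s l ih =>
    intro b asg hnd hasg
    simp only [List.foldl_cons, List.filter_cons]
    by_cases hcond : (!(PySem.Set.contains asg s) && kws.any (fun kw => PySem.Str.isIn kw (PySem.Str.lower s))) = true
    · obtain ⟨h1, hm⟩ := Bool.and_eq_true_iff.mp hcond
      rw [Bool.not_eq_true'] at h1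
      have hnotmem : s ∉ asg := by
        intro hmm
        rw [(PySem.Set.contains_iff asg s).mpr hmm] at h1
        exact Bool.noConfusion h1
      have hQ : Q s = false := by
        by_cases h : Q s = true
        · exact absurd ((hasg s).mpr (Or.inl h)) hnotmem
        · exact eq_false_of_ne_true h
      have hb : s ∉ b := fun hbm => hnotmem ((hasg s).mpr (Or.inr hbm))
      have hfilter : (!(Q s) && kws.any (fun kw => PySem.Str.isIn kw (PySem.Str.lower s))) = true := by
        rw [hQ, hm]; rfl
      rw [if_pos hcond, if_pos hfilter]
      have ihh := ih (b ++ [s]) (PySem.Set.add asg s) (pv_nodup_snoc b s hnd hb)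
        (by
          intro x
          rw [PySem.Set.mem_add]
          constructor
          · rintro (hx | rfl)
            · rcases (hasg x).mp hx with h | h
              · exact Or.inl h
              · exact Or.inr (by simp [h])
            · exact Or.inr (by simp)
          · rintro (h | hx)
            · exact Or.inl ((hasg x).mpr (Or.inl h))
            · rcases List.mem_append.mp hx with h | h
              · exact Or.inl ((hasg x).mpr (Or.inr h))
              · exact Or.inr (by simpa using h))
      refine ⟨?_, ihh.2⟩
      rw [ihh.1]
      congr 1
      simp
    · rw [if_neg hcond]
      have ihh := ih b asg hnd hasg
      by_cases hkeep : (!(Q s) && kws.any (fun kw => PySem.Str.isIn kw (PySem.Str.lower s))) = true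
      · obtain ⟨h1, hm⟩ := Bool.and_eq_true_iff.mp hkeep
        rw [Bool.not_eq_true'] at h1
        have hmemasg : s ∈ asg := by
          by_contra hnm
          apply hcond
          have hcf : PySem.Set.contains asg s = false := by
            by_cases h : PySem.Set.contains asg s = true
            · exact absurd ((PySem.Set.contains_iff asg s).mp h) hnm
            · exact eq_false_of_ne_true h
          rw [hcf, hm]; rfl
        have hb : s ∈ b := by
          rcases (hasg s).mp hmemasg with h | h
          · rw [h1] at h; exact Bool.noConfusion h
          · exact h
        rw [if_pos hkeep]
        exact ⟨by rw [ihh.1, pv_dedup_absorb _ _ _ hb], ihh.2⟩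
      · rw [if_neg hkeep]
        exact ihh

theorem pv_others_scan (A : PySem.Set String) (P : String → Bool)
    (hA : ∀ x, x ∈ A ↔ P x = true) :
    ∀ (l o : List String), o.Nodup →
      List.foldl (fun o s =>
          if !(PySem.Set.contains A s) && !(o.contains s) then o ++ [s] else o) o l
        = PySem.List.dedup (o ++ l.filter (fun s => !(P s))) := by
  intro l
  induction l with
  | nil =>
    intro o hnd
    simp [PySem.List.dedup_eq_ofList, PySem.Set.ofList_eq_self_of_nodup _ hnd]
  | cons s l ih =>
    intro o hnd
    simp only [List.foldl_cons, List.filter_cons]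
    by_cases hcond : (!(PySem.Set.contains A s) && !(o.contains s)) = true
    · obtain ⟨h1, h2⟩ := Bool.and_eq_true_iff.mp hcond
      rw [Bool.not_eq_true'] at h1 h2
      have hP : P s = false := by
        by_cases h : P s = true
        · rw [(PySem.Set.contains_iff A s).mpr ((hA s).mpr h)] at h1
          exact Bool.noConfusion h1
        · exact eq_false_of_ne_true h
      have ho : s ∉ o := by
        intro hmm
        rw [List.contains_iff_mem.mpr hmm] at h2
        exact Bool.noConfusion h2
      have hnp : (!(P s)) = true := by rw [hP]; rfl
      rw [if_pos hcond, if_pos hnp, ih (o ++ [s]) (pv_nodup_snoc o s hnd ho)]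
      congr 1
      simp
    · rw [if_neg hcond]
      by_cases hP : P s = true
      · rw [if_neg (by simp [hP])]
        exact ih o hnd
      · have hPf : P s = false := eq_false_of_ne_true hP
        have hnp : (!(P s)) = true := by rw [hPf]; rfl
        rw [if_pos hnp]
        have hcA : PySem.Set.contains A s = false := by
          by_cases h : PySem.Set.contains A s = true
          · have hPs := (hA s).mp ((PySem.Set.contains_iff A s).mp h)
            rw [hPf] at hPs
            exact Bool.noConfusion hPs
          · exact eq_false_of_ne_true h
        have ho : s ∈ o := by
          by_contra hno
          apply hcond
          have hc2 : o.contains s = false := by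
            by_cases h : o.contains s = true
            · exact absurd (List.contains_iff_mem.mp h) hno
            · exact eq_false_of_ne_true h
          rw [hcA, hc2]; rfl
        rw [ih o hnd, pv_dedup_absorb _ _ _ ho]

theorem pv_cat_eq_iff (cs₁ : List (String × List String)) (p : String × List String)
    (cs₂ : List (String × List String)) (h : pvKeywords = cs₁ ++ p :: cs₂) (s : String) :
    pvCat s = p.1 ↔ ((∀ q ∈ cs₁, ¬ pvMat q.2 s = true) ∧ pvMat p.2 s = true) := by
  have hnd : ((cs₁ ++ p :: cs₂).map (·.1)).Nodup := h ▸ pv_names_nodup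
  have hp1 : p.1 ∉ cs₁.map (·.1) := by
    rw [List.map_append, List.nodup_append] at hnd
    intro hmm
    exact (hnd.2.2 p.1 hmm p.1 (by simp)) rfl
  have hp2 : p.1 ∉ cs₂.map (·.1) := by
    rw [List.map_append, List.map_cons, List.nodup_append] at hnd
    exact (List.nodup_cons.mp hnd.2.1).1
  by_cases hq : ∃ q ∈ cs₁, pvMat q.2 s = true
  · cases hfq : cs₁.find? (fun q => pvMat q.2 s) with
    | none =>
      obtain ⟨q, hq1, hq2⟩ := hq
      exact absurd hq2 (by simpa using List.find?_eq_none.mp hfq q hq1)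
    | some q' =>
      have hcat : pvCat s = q'.1 := by
        unfold pvCat
        rw [h, List.find?_append, hfq]
        rfl
      have hq'mem := List.mem_of_find?_eq_some hfq
      have hq'mat : pvMat q'.2 s = true := by
        have := List.find?_some hfq
        simpa using this
      have hne : q'.1 ≠ p.1 := by
        intro heq
        exact hp1 (heq ▸ List.mem_map_of_mem hq'mem)
      rw [hcat]
      constructor
      · intro heq; exact absurd heq hne
      · rintro ⟨hall, _⟩
        exact absurd hq'mat (hall q' hq'mem)
  · push_neg at hq
    have hfq : cs₁.find? (fun q => pvMat q.2 s) = none := by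
      rw [List.find?_eq_none]
      intro q hqm
      simpa using hq q hqm
    by_cases hm : pvMat p.2 s = true
    · have hcat : pvCat s = p.1 := by
        unfold pvCat
        rw [h, List.find?_append, hfq]
        simp [List.find?_cons, hm]
      simp only [hcat, true_iff]
      exact ⟨fun q hqm => by simpa using hq q hqm, hm⟩
    · have hcat : pvCat s ≠ p.1 := by
        unfold pvCat
        rw [h, List.find?_append, hfq]
        simp only [Option.none_or]
        rw [show (p :: cs₂).find? (fun q => pvMat q.2 s) = cs₂.find? (fun q => pvMat q.2 s) by
          simp [List.find?_cons, eq_false_of_ne_true hm]]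
        cases hr : cs₂.find? (fun q => pvMat q.2 s) with
        | none =>
          show ¬ ("Others" = p.1)
          intro heq
          have hmem : p.1 ∈ pvKeywords.map (·.1) := by
            rw [h]; simp
          rw [← heq] at hmem
          exact pv_others_not_name hmem
        | some r =>
          show ¬ (r.1 = p.1)
          intro heq
          exact hp2 (heq ▸ List.mem_map_of_mem (List.mem_of_find?_eq_some hr))
      simp [hcat, hm]

theorem pv_cat_others_iff (s : String) :
    pvCat s = "Others" ↔ ∀ q ∈ pvKeywords, ¬ pvMat q.2 s = true := by
  unfold pvCat
  cases hf : pvKeywords.find? (fun p => pvMat p.2 s) with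
  | none =>
    simp only [true_iff]
    intro q hqm
    simpa using List.find?_eq_none.mp hf q hqm
  | some r =>
    have hr1 : r ∈ pvKeywords := List.mem_of_find?_eq_some hf
    have hr2 : pvMat r.2 s = true := by
      have := List.find?_some hf
      simpa using this
    have hro : r.1 ≠ "Others" := by
      intro heq
      exact pv_others_not_name (heq ▸ List.mem_map_of_mem hr1)
    show r.1 = "Others" ↔ _
    simp only [hro, false_iff]
    push_neg
    exact ⟨r, hr1, hr2⟩

-- ---- B: outer category fold ----

def pvStepB (svs : List String) (acc : PySem.Dict String (List String) × PySem.Set String)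
    (ck : String × List String) : PySem.Dict String (List String) × PySem.Set String :=
  let inner := List.foldl (fun bs s =>
    if !(PySem.Set.contains bs.2 s) && ck.2.any (fun kw => PySem.Str.isIn kw (PySem.Str.lower s)) then
      (bs.1 ++ [s], PySem.Set.add bs.2 s)
    else bs) (([] : List String), acc.2) svs
  (if inner.1 ≠ [] then acc.1.insert ck.1 inner.1 else acc.1, inner.2)

theorem pv_B_outer (svs : List String) :
    ∀ (cs₂ cs₁ : List (String × List String))
      (acc : PySem.Dict String (List String) × PySem.Set String),
      pvKeywords = cs₁ ++ cs₂ →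
      acc.1.items = (cs₁.map (fun p => (p.1, pvBucket p.1 svs))).filter (fun kv => kv.2 ≠ []) →
      (∀ x, x ∈ acc.2 ↔ (x ∈ svs ∧ ∃ q ∈ cs₁, pvMat q.2 x = true)) →
      (List.foldl (pvStepB svs) acc cs₂).1.items
        = (pvKeywords.map (fun p => (p.1, pvBucket p.1 svs))).filter (fun kv => kv.2 ≠ [])
      ∧ (∀ x, x ∈ (List.foldl (pvStepB svs) acc cs₂).2
          ↔ (x ∈ svs ∧ ∃ q ∈ pvKeywords, pvMat q.2 x = true)) := by
  intro cs₂
  induction cs₂ with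
  | nil =>
    intro cs₁ acc h hitems hasg
    rw [List.append_nil] at h
    subst h
    exact ⟨hitems, by simpa using hasg⟩
  | cons p cs₂ ih =>
    intro cs₁ acc h hitems hasg
    simp only [List.foldl_cons]
    have hscan := pv_scan p.2 (fun x => decide (x ∈ svs ∧ ∃ q ∈ cs₁, pvMat q.2 x = true))
      svs [] acc.2 List.nodup_nil
      (by intro x; simpa using hasg x)
    have hbucket : (List.foldl (fun bs s =>
        if !(PySem.Set.contains bs.2 s) && p.2.any (fun kw => PySem.Str.isIn kw (PySem.Str.lower s)) then
          (bs.1 ++ [s], PySem.Set.add bs.2 s)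
        else bs) (([] : List String), acc.2) svs).1 = pvBucket p.1 svs := by
      rw [hscan.1, List.nil_append]
      unfold pvBucket
      congr 1
      apply List.filter_congr
      intro s hs
      rw [Bool.eq_iff_iff]
      simp only [Bool.and_eq_true_iff, Bool.not_eq_true', decide_eq_false_iff_not, beq_iff_eq]
      rw [pv_mat_eq p.2 s, pv_cat_eq_iff cs₁ p cs₂ h s]
      constructor
      · rintro ⟨hna, hm⟩
        exact ⟨fun q hq hqm => hna ⟨hs, q, hq, hqm⟩, hm⟩
      · rintro ⟨hall, hm⟩
        exact ⟨fun hc => by obtain ⟨_, q, hq, hqm⟩ := hc; exact hall q hq hqm, hm⟩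
    have hstep : pvStepB svs acc p
        = (if pvBucket p.1 svs ≠ [] then acc.1.insert p.1 (pvBucket p.1 svs) else acc.1,
           (List.foldl (fun bs s =>
             if !(PySem.Set.contains bs.2 s) && p.2.any (fun kw => PySem.Str.isIn kw (PySem.Str.lower s)) then
               (bs.1 ++ [s], PySem.Set.add bs.2 s)
             else bs) (([] : List String), acc.2) svs).2) := by
      simp only [pvStepB]
      rw [hbucket]
    rw [hstep]
    have hnd : ((cs₁ ++ p :: cs₂).map (·.1)).Nodup := h ▸ pv_names_nodup
    have hp1 : p.1 ∉ cs₁.map (·.1) := by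
      rw [List.map_append, List.nodup_append] at hnd
      intro hmm
      exact (hnd.2.2 p.1 hmm p.1 (by simp)) rfl
    have hfresh : acc.1.contains p.1 = false := by
      rw [PySem.Dict.contains_eq_decide_mem_keys]
      have hkeys : acc.1.keys = ((cs₁.map (fun p => (p.1, pvBucket p.1 svs))).filter (fun kv => kv.2 ≠ [])).map (·.1) := by
        show acc.1.items.map (·.1) = _
        rw [hitems]
      rw [hkeys]
      simp only [decide_eq_false_iff_not]
      intro hmm
      obtain ⟨kv, hkv1, hkv2⟩ := List.mem_map.mp hmm
      obtain ⟨q, hq1, rfl⟩ := List.mem_map.mp (List.mem_of_mem_filter hkv1)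
      have hq1' : q.1 ∈ cs₁.map (·.1) := List.mem_map.mpr ⟨q, hq1, rfl⟩
      exact hp1 (hkv2 ▸ hq1')
    have hitems' : (if pvBucket p.1 svs ≠ [] then acc.1.insert p.1 (pvBucket p.1 svs) else acc.1).items
        = ((cs₁ ++ [p]).map (fun p => (p.1, pvBucket p.1 svs))).filter (fun kv => kv.2 ≠ []) := by
      rw [List.map_append, List.filter_append]
      by_cases hb : pvBucket p.1 svs ≠ []
      · rw [if_pos hb, PySem.Dict.items_insert_of_not_contains _ _ hfresh, hitems]
        simp [hb]
      · rw [if_neg hb, hitems]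
        push_neg at hb
        simp [hb]
    have hasg' : ∀ x, x ∈ (List.foldl (fun bs s =>
        if !(PySem.Set.contains bs.2 s) && p.2.any (fun kw => PySem.Str.isIn kw (PySem.Str.lower s)) then
          (bs.1 ++ [s], PySem.Set.add bs.2 s)
        else bs) (([] : List String), acc.2) svs).2
        ↔ (x ∈ svs ∧ ∃ q ∈ cs₁ ++ [p], pvMat q.2 x = true) := by
      intro x
      rw [hscan.2 x, hbucket]
      have hbmem : x ∈ pvBucket p.1 svs ↔ (x ∈ svs ∧ pvCat x = p.1) := by
        simp [pvBucket, PySem.List.dedup_eq_ofList, PySem.Set.mem_ofList, List.mem_filter]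
      rw [hbmem]
      have hiff := pv_cat_eq_iff cs₁ p cs₂ h x
      simp only [decide_eq_true_eq]
      constructor
      · rintro (⟨hx, q, hq1, hq2⟩ | ⟨hx, hcx⟩)
        · exact ⟨hx, q, List.mem_append.mpr (Or.inl hq1), hq2⟩
        · exact ⟨hx, p, List.mem_append.mpr (Or.inr (by simp)), (hiff.mp hcx).2⟩
      · rintro ⟨hx, q, hq1, hq2⟩
        rcases List.mem_append.mp hq1 with hq | hq
        · exact Or.inl ⟨hx, q, hq, hq2⟩
        · have heq : q = p := by simpa using hq
          subst heq
          by_cases hall : ∀ q' ∈ cs₁, ¬ pvMat q'.2 x = true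
          · exact Or.inr ⟨hx, hiff.mpr ⟨hall, hq2⟩⟩
          · push_neg at hall
            obtain ⟨q', hq'1, hq'2⟩ := hall
            exact Or.inl ⟨hx, q', hq'1, hq'2⟩
    exact ih (cs₁ ++ [p])
      (if pvBucket p.1 svs ≠ [] then acc.1.insert p.1 (pvBucket p.1 svs) else acc.1,
       (List.foldl (fun bs s =>
         if !(PySem.Set.contains bs.2 s) && p.2.any (fun kw => PySem.Str.isIn kw (PySem.Str.lower s)) then
           (bs.1 ++ [s], PySem.Set.add bs.2 s)
         else bs) (([] : List String), acc.2) svs).2)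
      (by rw [h, List.append_assoc]; rfl) hitems' hasg'

theorem pv_B_eq_target (svs : List String) :
    group_services_by_keywords_py_alt svs = pvTarget svs := by
  show (let step := List.foldl (pvStepB svs) (PySem.Dict.empty, PySem.Set.empty) pvKeywords
    let others := List.foldl (fun o s =>
      if !(PySem.Set.contains step.2 s) && !(o.contains s) then o ++ [s] else o) [] svs
    (if others ≠ [] then step.1.insert "Others" others else step.1).items) = pvTarget svs
  have houter := pv_B_outer svs pvKeywords [] (PySem.Dict.empty, PySem.Set.empty)
    (by simp) (by rfl)
    (by
      intro x
      constructor
      · intro hx; cases hx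
      · rintro ⟨_, q, hq, _⟩
        exact absurd hq (by rintro ⟨⟩))
  set F := List.foldl (pvStepB svs) (PySem.Dict.empty, PySem.Set.empty) pvKeywords with hF
  have hothers : List.foldl (fun o s =>
      if !(PySem.Set.contains F.2 s) && !(o.contains s) then o ++ [s] else o) [] svs
      = pvBucket "Others" svs := by
    rw [pv_others_scan F.2 (fun x => decide (x ∈ svs ∧ ∃ q ∈ pvKeywords, pvMat q.2 x = true))
      (by intro x; simpa using houter.2 x) svs [] List.nodup_nil]
    rw [List.nil_append]
    unfold pvBucket
    congr 1
    apply List.filter_congr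
    intro s hs
    rw [Bool.eq_iff_iff]
    simp only [Bool.not_eq_true', decide_eq_false_iff_not, beq_iff_eq]
    rw [pv_cat_others_iff s]
    constructor
    · intro hna q hq hqm
      exact hna ⟨hs, q, hq, hqm⟩
    · intro hall hc
      obtain ⟨_, q, hq, hqm⟩ := hc
      exact hall q hq hqm
  simp only []
  rw [hothers]
  have htar : pvTarget svs
      = (pvKeywords.map (fun p => (p.1, pvBucket p.1 svs))).filter (fun kv => kv.2 ≠ [])
        ++ (if pvBucket "Others" svs ≠ [] then [("Others", pvBucket "Others" svs)] else []) := by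
    unfold pvTarget pvCats
    rw [List.map_append, List.filter_append, List.map_map]
    congr 1
    simp only [List.map_cons, List.map_nil, List.filter]
    by_cases hb : pvBucket "Others" svs ≠ []
    · simp [hb]
    · push_neg at hb
      simp [hb]
  rw [htar, ← houter.1]
  by_cases hb : pvBucket "Others" svs ≠ []
  · rw [if_pos hb, if_pos hb]
    have hfresh : F.1.contains "Others" = false := by
      rw [PySem.Dict.contains_eq_decide_mem_keys]
      simp only [decide_eq_false_iff_not]
      intro hmm
      have hkeys : F.1.keys = F.1.items.map (·.1) := rfl
      rw [hkeys, houter.1] at hmm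
      obtain ⟨kv, hkv1, hkv2⟩ := List.mem_map.mp hmm
      obtain ⟨q, hq1, rfl⟩ := List.mem_map.mp (List.mem_of_mem_filter hkv1)
      have hq1' : q.1 ∈ pvKeywords.map (·.1) := List.mem_map.mpr ⟨q, hq1, rfl⟩
      exact pv_others_not_name (hkv2 ▸ hq1')
    rw [PySem.Dict.items_insert_of_not_contains _ _ hfresh]
  · rw [if_neg hb, if_neg hb, List.append_nil]

-- ===== VERDICT (by name: the statement is the Claim_ definition above) =====
theorem group_services_by_keywords_py_spec : Claim_equal_group_services_by_keywords_py := by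
  intro services _
  unfold Spec_group_services_by_keywords_py
  rw [pv_A_eq_target, pv_B_eq_target]
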